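-- pv_equiv track=rewrite | github.com/ZJU-PL/aria | aria/abduction/abductor_parser.py | extract_all_commands
-- ===== SOURCE A (Python) =====
-- from typing import Any, Dict, List, Optional, Tuple
--
-- def _skip_whitespace(text: str, idx: int) -> int:
--     """Advance past whitespace characters."""
--     while idx < len(text) and text[idx].isspace():
--         idx += 1
--     return idx
--
-- def extract_balanced_expr(text: str, start_idx: int = 0) -> str:
--     """Extract the balanced parenthesized expression starting at ``start_idx``."""
--     start_idx = _skip_whitespace(text, start_idx)
--     if start_idx >= len(text) or text[start_idx] != "(":
--         return ""
--
--     depth = 0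
--     in_string = False
--     escaped = False
--
--     for idx in range(start_idx, len(text)):
--         char = text[idx]
--         if in_string:
--             if escaped:
--                 escaped = False
--             elif char == "\\":
--                 escaped = True
--             elif char == '"':
--                 in_string = False
--             continue
--
--         if char == '"':
--             in_string = True
--         elif char == "(":
--             depth += 1
--         elif char == ")":
--             depth -= 1
--             if depth == 0:
--                 return text[start_idx : idx + 1]
--
--     return text[start_idx:]
--
-- def extract_all_commands(smt2_str: str) -> List[str]:
--     """Extract all top-level SMT-LIB commands in source order."""
--     commands: List[str] = []
--     idx = 0
--     length = len(smt2_str)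
--
--     while idx < length:
--         idx = _skip_whitespace(smt2_str, idx)
--         if idx >= length:
--             break
--         if smt2_str[idx] == ";":
--             next_newline = smt2_str.find("\n", idx)
--             idx = length if next_newline == -1 else next_newline + 1
--             continue
--         if smt2_str[idx] != "(":
--             idx += 1
--             continue
--
--         command = extract_balanced_expr(smt2_str, idx)
--         if not command:
--             break
--         commands.append(command)
--         idx += len(command)
--
--     return commands
-- ===== SOURCE B (Python) =====
-- from typing import Any, Dict, List, Optional, Tuple
--
-- def _scan_string(text: str, j: int) -> int:
--     """j is the index just after an opening quote; return the index just past
--     the closing quote, or len(text) if the string never closes."""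
--     n = len(text)
--     while j < n:
--         c = text[j]
--         if c == "\\":
--             j += 2
--         elif c == '"':
--             return j + 1
--         else:
--             j += 1
--     return n
--
-- def _parse_paren(text: str, i: int) -> int:
--     """text[i] == '('; recursive descent: return the index just past the
--     matching ')', or len(text) if the group is unbalanced."""
--     n = len(text)
--     j = i + 1
--     while j < n:
--         c = text[j]
--         if c == '"':
--             j = _scan_string(text, j + 1)
--         elif c == "(":
--             j = _parse_paren(text, j)
--         elif c == ")":
--             return j + 1
--         else:
--             j += 1
--     return n
--
-- def extract_all_commands(smt2_str: str) -> List[str]: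
--     commands: List[str] = []
--     idx = 0
--     n = len(smt2_str)
--     while idx < n:
--         c = smt2_str[idx]
--         if c.isspace():
--             idx += 1
--         elif c == ";":
--             nl = smt2_str.find("\n", idx)
--             idx = n if nl == -1 else nl + 1
--         elif c == "(":
--             end = _parse_paren(smt2_str, idx)
--             commands.append(smt2_str[idx:end])
--             idx = end
--         else:
--             idx += 1
--     return commands
-- ===== Notes on version B (the rewrite author's own statement) =====
-- stated objective: alternative
-- what changed: The iterative depth-counter scanner (extract_balanced_expr with depth/in_string/escaped state) is replaced by a recursive-descent parser: a string scanner plus a parse_paren that recurses on each nested '(' and returns the index just past the matching ')'; the top-level loop dispatches per character instead of using a whitespace-skipping helper.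
import Mathlib
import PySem

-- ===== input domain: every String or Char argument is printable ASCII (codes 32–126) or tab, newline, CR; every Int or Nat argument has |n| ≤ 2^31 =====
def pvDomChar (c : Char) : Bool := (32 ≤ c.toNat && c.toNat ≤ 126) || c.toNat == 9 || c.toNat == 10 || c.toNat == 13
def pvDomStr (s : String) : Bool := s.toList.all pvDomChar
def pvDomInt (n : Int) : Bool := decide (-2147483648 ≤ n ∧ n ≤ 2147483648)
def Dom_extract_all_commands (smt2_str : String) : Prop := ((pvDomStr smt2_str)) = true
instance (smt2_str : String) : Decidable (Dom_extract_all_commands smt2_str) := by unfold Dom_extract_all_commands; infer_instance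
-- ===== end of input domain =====

-- B replaces A's depth-counter scanner by a recursive-descent parser over the nested
-- S-expression structure (objective: alternative decomposition; same asymptotic cost).
-- All loops are ported with fuel = length+1, which is ample since every iteration
-- strictly advances the scanned index.

-- ===== PORT A =====

-- _skip_whitespace: while idx < len and text[idx].isspace(): idx += 1
def pvSkipWS (fuel : Nat) (cs : List Char) (idx : Nat) : Nat :=
  match fuel with
  | 0 => idx
  | fuel + 1 =>
    if h : idx < cs.length then
      if PySem.Chars.isspace cs[idx] then pvSkipWS fuel cs (idx + 1) else idx
    else idx

-- exact hand port of text.find("\n", idx) for 0 ≤ idx and a one-char needle (none = -1)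
def pvFindNL (fuel : Nat) (cs : List Char) (idx : Nat) : Option Nat :=
  match fuel with
  | 0 => none
  | fuel + 1 =>
    if h : idx < cs.length then
      if cs[idx] = '\n' then some idx else pvFindNL fuel cs (idx + 1)
    else none

-- the for-loop of extract_balanced_expr, state (depth, in_string, escaped);
-- some idx = the 'return text[start:idx+1]' exit, none = loop fell through
def pvEbeLoop (fuel : Nat) (cs : List Char) (idx : Nat) (depth : Int) (instr esc : Bool) : Option Nat :=
  match fuel with
  | 0 => none
  | fuel + 1 =>
    if h : idx < cs.length then
      if instr then
        if esc then pvEbeLoop fuel cs (idx + 1) depth true false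
        else if cs[idx] = '\\' then pvEbeLoop fuel cs (idx + 1) depth true true
        else if cs[idx] = '"' then pvEbeLoop fuel cs (idx + 1) depth false false
        else pvEbeLoop fuel cs (idx + 1) depth true false
      else if cs[idx] = '"' then pvEbeLoop fuel cs (idx + 1) depth true false
      else if cs[idx] = '(' then pvEbeLoop fuel cs (idx + 1) (depth + 1) false false
      else if cs[idx] = ')' then
        if depth - 1 = 0 then some idx else pvEbeLoop fuel cs (idx + 1) (depth - 1) false false
      else pvEbeLoop fuel cs (idx + 1) depth false false
    else none

-- extract_balanced_expr (slices written as drop/take, the meaning of xs[a:b] for Nat bounds)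
def pvEbe (cs : List Char) (start : Nat) : List Char :=
  let s := pvSkipWS (cs.length + 1) cs start
  if h : s < cs.length then
    if cs[s] = '(' then
      match pvEbeLoop (cs.length + 1) cs s 0 false false with
      | some j => (cs.drop s).take (j + 1 - s)
      | none => cs.drop s
    else []
  else []

-- top-level while loop of A
def pvTopA (fuel : Nat) (cs : List Char) (idx : Nat) (acc : List String) : List String :=
  match fuel with
  | 0 => acc
  | fuel + 1 =>
    let i := pvSkipWS (cs.length + 1) cs idx
    if h : i < cs.length then
      if cs[i] = ';' then
        pvTopA fuel cs (match pvFindNL (cs.length + 1) cs i with | none => cs.length | some nl => nl + 1) acc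
      else if cs[i] ≠ '(' then
        pvTopA fuel cs (i + 1) acc
      else
        let cmd := pvEbe cs i
        if cmd = [] then acc
        else pvTopA fuel cs (i + cmd.length) (acc ++ [String.ofList cmd])
    else acc

def extract_all_commands (smt2_str : String) : List String :=
  pvTopA (smt2_str.toList.length + 1) smt2_str.toList 0 []

-- ===== PORT B =====

-- _scan_string: j is just after the opening quote; index just past the closing quote, or len
def pvScanStr (fuel : Nat) (cs : List Char) (j : Nat) : Nat :=
  match fuel with
  | 0 => cs.length
  | fuel + 1 =>
    if h : j < cs.length then
      if cs[j] = '\\' then pvScanStr fuel cs (j + 2)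
      else if cs[j] = '"' then j + 1
      else pvScanStr fuel cs (j + 1)
    else cs.length

-- the while-loop inside _parse_paren, entered at j = i+1; recursion on each child group
def pvPPLoop (fuel : Nat) (cs : List Char) (j : Nat) : Nat :=
  match fuel with
  | 0 => cs.length
  | fuel + 1 =>
    if h : j < cs.length then
      if cs[j] = '"' then pvPPLoop fuel cs (pvScanStr (cs.length + 1) cs (j + 1))
      else if cs[j] = '(' then pvPPLoop fuel cs (pvPPLoop fuel cs (j + 1))
      else if cs[j] = ')' then j + 1
      else pvPPLoop fuel cs (j + 1)
    else cs.length

-- _parse_paren(text, i): text[i] == '(' ; index just past the matching ')', or len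
def pvParseParen (cs : List Char) (i : Nat) : Nat := pvPPLoop (cs.length + 1) cs (i + 1)

-- top-level while loop of B (whitespace skipped one char per iteration)
def pvTopB (fuel : Nat) (cs : List Char) (idx : Nat) (acc : List String) : List String :=
  match fuel with
  | 0 => acc
  | fuel + 1 =>
    if h : idx < cs.length then
      if PySem.Chars.isspace cs[idx] then pvTopB fuel cs (idx + 1) acc
      else if cs[idx] = ';' then
        pvTopB fuel cs (match pvFindNL (cs.length + 1) cs idx with | none => cs.length | some nl => nl + 1) acc
      else if cs[idx] = '(' then
        let e := pvParseParen cs idx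
        pvTopB fuel cs e (acc ++ [String.ofList ((cs.drop idx).take (e - idx))])
      else pvTopB fuel cs (idx + 1) acc
    else acc

def extract_all_commands_alt (smt2_str : String) : List String :=
  pvTopB (smt2_str.toList.length + 1) smt2_str.toList 0 []

-- ===== PRECONDITION & SPEC =====
def Spec_extract_all_commands (smt2_str : String) (out : List String) : Prop := out = extract_all_commands_alt smt2_str
instance (smt2_str : String) (out : List String) : Decidable (Spec_extract_all_commands smt2_str out) := by unfold Spec_extract_all_commands; infer_instance

-- ===== CLAIM (what is proved, stated in full; the proofs are below) =====
def Claim_equal_extract_all_commands : Prop := ∀ (smt2_str : String), Dom_extract_all_commands smt2_str → Spec_extract_all_commands smt2_str (extract_all_commands smt2_str)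

-- ===== LEMMAS AND PROOFS =====

-- proof-only shorthands at canonical fuel
def SS (cs : List Char) (j : Nat) : Nat := pvScanStr (cs.length + 1) cs j
def PP (cs : List Char) (j : Nat) : Nat := pvPPLoop (cs.length + 1) cs j
def EB (cs : List Char) (j : Nat) (d : Int) (i e : Bool) : Option Nat :=
  pvEbeLoop (cs.length + 1) cs j d i e

-- B's scan iterated d+1 times = close d+1 pending groups (proof-only)
def ppIter (cs : List Char) : Nat → Nat → Nat
  | 0, j => PP cs j
  | d + 1, j => ppIter cs d (PP cs j)

-- the end index A's depth-d+1 scan yields (proof-only)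
def ebeEnd (cs : List Char) (d : Nat) (j : Nat) : Nat :=
  match EB cs j ((d : Int) + 1) false false with
  | some k => k + 1
  | none => cs.length

-- ----- pvSkipWS -----

lemma sw_stop (cs : List Char) (f idx : Nat) (h : cs.length ≤ idx) : pvSkipWS f cs idx = idx := by
  cases f with
  | zero => rfl
  | succ f => simp [pvSkipWS, Nat.not_lt.mpr h]

lemma sw_stop' (cs : List Char) (f idx : Nat) (h : idx < cs.length)
    (h2 : PySem.Chars.isspace cs[idx] = false) : pvSkipWS f cs idx = idx := by
  cases f with
  | zero => rfl
  | succ f => simp [pvSkipWS, h, h2]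

lemma sw_fuel (cs : List Char) : ∀ f g idx, cs.length - idx < f → cs.length - idx < g →
    pvSkipWS f cs idx = pvSkipWS g cs idx := by
  intro f
  induction f with
  | zero => intro g idx hf; omega
  | succ f ih =>
    intro g idx hf hg
    cases g with
    | zero => omega
    | succ g =>
      by_cases h : idx < cs.length
      · simp only [pvSkipWS]
        rw [dif_pos h, dif_pos h]
        by_cases hw : PySem.Chars.isspace cs[idx] = true
        · rw [if_pos hw, if_pos hw]
          exact ih g (idx + 1) (by omega) (by omega)
        · rw [if_neg hw, if_neg hw]
      · rw [sw_stop cs _ idx (by omega), sw_stop cs _ idx (by omega)]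

lemma swF_step (cs : List Char) (idx : Nat) (h : idx < cs.length)
    (h2 : PySem.Chars.isspace cs[idx] = true) :
    pvSkipWS (cs.length + 1) cs idx = pvSkipWS (cs.length + 1) cs (idx + 1) := by
  conv_lhs => rw [pvSkipWS]
  rw [dif_pos h, if_pos h2]
  exact sw_fuel cs _ _ (idx + 1) (by omega) (by omega)

-- ----- pvFindNL -----

lemma findNL_ge (cs : List Char) : ∀ f i nl, pvFindNL f cs i = some nl → i ≤ nl ∧ nl < cs.length := by
  intro f
  induction f with
  | zero => intro i nl he; simp [pvFindNL] at he
  | succ f ih =>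
    intro i nl he
    simp only [pvFindNL] at he
    by_cases h : i < cs.length
    · rw [dif_pos h] at he
      by_cases hc : cs[i] = '\n'
      · rw [if_pos hc] at he; simp at he; omega
      · rw [if_neg hc] at he; have := ih (i + 1) nl he; omega
    · rw [dif_neg h] at he; simp at he

-- ----- pvScanStr -----

lemma ss_len (cs : List Char) (f j : Nat) (h : cs.length ≤ j) : pvScanStr f cs j = cs.length := by
  cases f with
  | zero => rfl
  | succ f => simp [pvScanStr, Nat.not_lt.mpr h]

lemma ss_le (cs : List Char) : ∀ f j, pvScanStr f cs j ≤ cs.length := by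
  intro f
  induction f with
  | zero => intro j; simp [pvScanStr]
  | succ f ih =>
    intro j; simp only [pvScanStr]
    split_ifs with h h1 h2
    · exact ih _
    · omega
    · exact ih _
    · omega

lemma ss_gt (cs : List Char) : ∀ f j, j < cs.length → cs.length - j < f → j < pvScanStr f cs j := by
  intro f
  induction f with
  | zero => intro j _ hf; omega
  | succ f ih =>
    intro j hj hf
    simp only [pvScanStr]
    rw [dif_pos hj]
    split_ifs with h1 h2
    · by_cases h4 : j + 2 < cs.length
      · have := ih (j + 2) h4 (by omega); omega
      · rw [ss_len cs f _ (by omega)]; omega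
    · omega
    · by_cases h4 : j + 1 < cs.length
      · have := ih (j + 1) h4 (by omega); omega
      · rw [ss_len cs f _ (by omega)]; omega

lemma ss_fuel (cs : List Char) : ∀ f g j, cs.length - j < f → cs.length - j < g →
    pvScanStr f cs j = pvScanStr g cs j := by
  intro f
  induction f with
  | zero => intro g j hf; omega
  | succ f ih =>
    intro g j hf hg
    cases g with
    | zero => omega
    | succ g =>
      by_cases hj : j < cs.length
      · simp only [pvScanStr]
        rw [dif_pos hj, dif_pos hj]
        split_ifs with h1 h2
        · exact ih g (j + 2) (by omega) (by omega)
        · rfl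
        · exact ih g (j + 1) (by omega) (by omega)
      · rw [ss_len cs _ j (by omega), ss_len cs _ j (by omega)]

lemma SS_def (cs : List Char) (j : Nat) : pvScanStr (cs.length + 1) cs j = SS cs j := rfl

lemma SS_le (cs : List Char) (j : Nat) : SS cs j ≤ cs.length := ss_le cs _ j

lemma SS_len (cs : List Char) (j : Nat) (h : cs.length ≤ j) : SS cs j = cs.length := ss_len cs _ j h

lemma SS_gt (cs : List Char) (j : Nat) (h : j < cs.length) : j < SS cs j :=
  ss_gt cs _ j h (by omega)

lemma SS_bs (cs : List Char) (j : Nat) (h : j < cs.length) (hc : cs[j] = '\\') :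
    SS cs j = SS cs (j + 2) := by
  unfold SS
  conv_lhs => rw [pvScanStr]
  rw [dif_pos h, if_pos hc]
  exact ss_fuel cs _ _ (j + 2) (by omega) (by omega)

lemma SS_quote (cs : List Char) (j : Nat) (h : j < cs.length) (h1 : ¬ cs[j] = '\\')
    (hc : cs[j] = '"') : SS cs j = j + 1 := by
  unfold SS
  rw [pvScanStr, dif_pos h, if_neg h1, if_pos hc]

lemma SS_other (cs : List Char) (j : Nat) (h : j < cs.length) (h1 : ¬ cs[j] = '\\')
    (h2 : ¬ cs[j] = '"') : SS cs j = SS cs (j + 1) := by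
  unfold SS
  conv_lhs => rw [pvScanStr]
  rw [dif_pos h, if_neg h1, if_neg h2]
  exact ss_fuel cs _ _ (j + 1) (by omega) (by omega)

-- ----- pvPPLoop -----

lemma pp_le (cs : List Char) : ∀ fuel j, pvPPLoop fuel cs j ≤ cs.length := by
  intro fuel
  induction fuel with
  | zero => intro j; simp [pvPPLoop]
  | succ fuel ih =>
    intro j; simp only [pvPPLoop]
    split_ifs with h h1 h2 h3
    · exact ih _
    · exact ih _
    · omega
    · exact ih _
    · omega

lemma pp_len (cs : List Char) : ∀ fuel j, cs.length ≤ j → pvPPLoop fuel cs j = cs.length := by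
  intro fuel
  cases fuel with
  | zero => intro j _; simp [pvPPLoop]
  | succ fuel => intro j h; simp only [pvPPLoop]; rw [dif_neg (by omega)]

lemma pp_gt (cs : List Char) : ∀ fuel j, j < cs.length → cs.length - j < fuel → j < pvPPLoop fuel cs j := by
  intro fuel
  induction fuel with
  | zero => intro j _ h2; omega
  | succ fuel ih =>
    intro j hj hf; simp only [pvPPLoop, SS_def]
    rw [dif_pos hj]
    split_ifs with h1 h2 h3
    · -- quote: continue past the string
      set s := SS cs (j + 1) with hs
      by_cases h4 : s < cs.length
      · have hgt : j + 1 < s ∨ cs.length ≤ j + 1 := by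
          by_cases h5 : j + 1 < cs.length
          · exact Or.inl (SS_gt cs _ h5)
          · exact Or.inr (by omega)
        rcases hgt with h5 | h5
        · have := ih s h4 (by omega); omega
        · have : s = cs.length := by rw [hs]; exact SS_len cs _ h5
          omega
      · rw [pp_len cs fuel s (by omega)]; omega
    · -- open: child then continue
      set r := pvPPLoop fuel cs (j + 1) with hr
      by_cases h4 : j + 1 < cs.length
      · have hrgt : j + 1 < r := ih _ h4 (by omega)
        have hrle : r ≤ cs.length := pp_le cs fuel _
        by_cases h5 : r < cs.length
        · have := ih r h5 (by omega); omega
        · rw [pp_len cs fuel r (by omega)]; omega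
      · have : r = cs.length := pp_len cs fuel _ (by omega)
        rw [this, pp_len cs fuel _ (by omega)]; omega
    · omega
    · by_cases h4 : j + 1 < cs.length
      · have := ih (j + 1) h4 (by omega); omega
      · rw [pp_len cs fuel _ (by omega)]; omega

lemma pp_fuel (cs : List Char) : ∀ f g j, cs.length - j < f → cs.length - j < g →
    pvPPLoop f cs j = pvPPLoop g cs j := by
  intro f
  induction f with
  | zero => intro g j hf; omega
  | succ f ih =>
    intro g j hf hg
    cases g with
    | zero => omega
    | succ g =>
      by_cases hj : j < cs.length
      · simp only [pvPPLoop, SS_def]; rw [dif_pos hj, dif_pos hj]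
        split_ifs with h1 h2
        · -- quote
          set s := SS cs (j + 1) with hs
          have hsle : s ≤ cs.length := SS_le cs _
          have : cs.length ≤ s ∨ j + 1 < s := by
            by_cases h5 : j + 1 < cs.length
            · exact Or.inr (SS_gt cs _ h5)
            · exact Or.inl (by rw [hs, SS_len cs _ (by omega)])
          exact ih g s (by omega) (by omega)
        · -- open
          have hinner : pvPPLoop f cs (j + 1) = pvPPLoop g cs (j + 1) :=
            ih g (j + 1) (by omega) (by omega)
          rw [← hinner]
          set r := pvPPLoop f cs (j + 1) with hr
          have hrle : r ≤ cs.length := pp_le cs f _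
          have : cs.length ≤ r ∨ j + 1 < r := by
            by_cases h5 : j + 1 < cs.length
            · exact Or.inr (pp_gt cs f _ h5 (by omega))
            · exact Or.inl (by rw [hr, pp_len cs f _ (by omega)])
          exact ih g r (by omega) (by omega)
        · rfl
        · exact ih g (j + 1) (by omega) (by omega)
      · rw [pp_len cs _ j (by omega), pp_len cs _ j (by omega)]

lemma PP_len (cs : List Char) (j : Nat) (h : cs.length ≤ j) : PP cs j = cs.length := pp_len cs _ j h

lemma PP_quote (cs : List Char) (j : Nat) (h : j < cs.length) (hc : cs[j] = '"') :
    PP cs j = PP cs (SS cs (j + 1)) := by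
  unfold PP
  conv_lhs => rw [pvPPLoop]
  rw [dif_pos h, if_pos hc]
  simp only [SS_def]
  set s := SS cs (j + 1) with hs
  have hsle : s ≤ cs.length := SS_le cs _
  have : cs.length ≤ s ∨ j + 1 < s := by
    by_cases h5 : j + 1 < cs.length
    · exact Or.inr (SS_gt cs _ h5)
    · exact Or.inl (by rw [hs, SS_len cs _ (by omega)])
  exact pp_fuel cs _ _ s (by omega) (by omega)

lemma PP_open (cs : List Char) (j : Nat) (h : j < cs.length) (hc : cs[j] = '(') :
    PP cs j = PP cs (PP cs (j + 1)) := by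
  unfold PP
  conv_lhs => rw [pvPPLoop]
  rw [dif_pos h, if_neg (by simp [hc]), if_pos hc]
  have hinner : pvPPLoop cs.length cs (j + 1) = pvPPLoop (cs.length + 1) cs (j + 1) :=
    pp_fuel cs _ _ (j + 1) (by omega) (by omega)
  rw [hinner]
  set r := pvPPLoop (cs.length + 1) cs (j + 1) with hr
  have hrle : r ≤ cs.length := pp_le cs _ _
  have : cs.length ≤ r ∨ j + 1 < r := by
    by_cases h5 : j + 1 < cs.length
    · exact Or.inr (pp_gt cs _ _ h5 (by omega))
    · exact Or.inl (by rw [hr, pp_len cs _ _ (by omega)])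
  exact pp_fuel cs _ _ r (by omega) (by omega)

lemma PP_close (cs : List Char) (j : Nat) (h : j < cs.length) (hc : cs[j] = ')') :
    PP cs j = j + 1 := by
  unfold PP
  rw [pvPPLoop]
  rw [dif_pos h, if_neg (by simp [hc]), if_neg (by simp [hc]), if_pos hc]

lemma PP_other (cs : List Char) (j : Nat) (h : j < cs.length) (h1 : ¬ cs[j] = '"')
    (h2 : ¬ cs[j] = '(') (h3 : ¬ cs[j] = ')') : PP cs j = PP cs (j + 1) := by
  unfold PP
  conv_lhs => rw [pvPPLoop]
  rw [dif_pos h, if_neg h1, if_neg h2, if_neg h3]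
  exact pp_fuel cs _ _ (j + 1) (by omega) (by omega)

-- ----- pvEbeLoop -----

lemma eb_stop_raw (cs : List Char) (f j : Nat) (d : Int) (b1 b2 : Bool) (h : cs.length ≤ j) :
    pvEbeLoop f cs j d b1 b2 = none := by
  cases f with
  | zero => rfl
  | succ f => simp [pvEbeLoop, Nat.not_lt.mpr h]

lemma eb_fuel (cs : List Char) : ∀ f g j, cs.length - j < f → cs.length - j < g →
    ∀ (d : Int) (b1 b2 : Bool), pvEbeLoop f cs j d b1 b2 = pvEbeLoop g cs j d b1 b2 := by
  intro f
  induction f with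
  | zero => intro g j hf; omega
  | succ f ih =>
    intro g j hf hg d b1 b2
    cases g with
    | zero => omega
    | succ g =>
      by_cases hj : j < cs.length
      · simp only [pvEbeLoop]
        rw [dif_pos hj, dif_pos hj]
        have step := ih g (j + 1) (by omega) (by omega)
        split_ifs <;> first | rfl | exact step _ _ _
      · rw [eb_stop_raw cs _ j d b1 b2 (by omega), eb_stop_raw cs _ j d b1 b2 (by omega)]

lemma eb_stop (cs : List Char) (j : Nat) (d : Int) (b1 b2 : Bool) (h : cs.length ≤ j) :
    EB cs j d b1 b2 = none := eb_stop_raw cs _ j d b1 b2 h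

lemma EB_unfold (cs : List Char) (j : Nat) (d : Int) (b1 b2 : Bool) (h : j < cs.length) :
    EB cs j d b1 b2 =
      (if b1 then
        if b2 then EB cs (j + 1) d true false
        else if cs[j] = '\\' then EB cs (j + 1) d true true
        else if cs[j] = '"' then EB cs (j + 1) d false false
        else EB cs (j + 1) d true false
      else if cs[j] = '"' then EB cs (j + 1) d true false
      else if cs[j] = '(' then EB cs (j + 1) (d + 1) false false
      else if cs[j] = ')' then
        if d - 1 = 0 then some j else EB cs (j + 1) (d - 1) false false
      else EB cs (j + 1) d false false) := by
  unfold EB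
  conv_lhs => rw [pvEbeLoop]
  rw [dif_pos h]
  simp only [eb_fuel cs cs.length (cs.length + 1) (j + 1) (by omega) (by omega)]

lemma ebe_esc (cs : List Char) (k : Nat) (d : Int) :
    EB cs k d true true = EB cs (k + 1) d true false := by
  by_cases h : k < cs.length
  · rw [EB_unfold cs k d true true h]; simp
  · rw [eb_stop cs k d true true (by omega), eb_stop cs (k + 1) d true false (by omega)]

lemma str_bridge (cs : List Char) (d : Int) : ∀ k,
    EB cs k d true false = EB cs (SS cs k) d false false := by
  have H : ∀ n k, cs.length - k ≤ n → EB cs k d true false = EB cs (SS cs k) d false false := by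
    intro n
    induction n with
    | zero =>
      intro k hk
      rw [eb_stop cs k d true false (by omega), SS_len cs k (by omega),
        eb_stop cs cs.length d false false le_rfl]
    | succ n ih =>
      intro k hk
      by_cases h : k < cs.length
      · by_cases h1 : cs[k] = '\\'
        · -- backslash: escape the next char
          rw [SS_bs cs k h h1, ← ih (k + 2) (by omega), show k + 2 = k + 1 + 1 from rfl,
            ← ebe_esc, EB_unfold cs k d true false h]
          simp [h1]
        · by_cases h2 : cs[k] = '"'
          · -- closing quote
            rw [SS_quote cs k h h1 h2, EB_unfold cs k d true false h]
            simp [h2]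
          · -- ordinary char inside the string
            rw [SS_other cs k h h1 h2, ← ih (k + 1) (by omega), EB_unfold cs k d true false h]
            simp [h1, h2]
      · rw [eb_stop cs k d true false (by omega), SS_len cs k (by omega),
          eb_stop cs cs.length d false false le_rfl]
  intro k
  exact H (cs.length - k) k le_rfl

-- ----- bridging A's depth counter to B's recursive descent -----

lemma ppIter_congr (cs : List Char) (d : Nat) (j j' : Nat) (h : PP cs j = PP cs j') :
    ppIter cs d j = ppIter cs d j' := by
  cases d <;> simp [ppIter, h]

lemma ppIter_len (cs : List Char) : ∀ d j, cs.length ≤ j → ppIter cs d j = cs.length := by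
  intro d
  induction d with
  | zero => intro j h; exact PP_len cs j h
  | succ d ih => intro j h; simp only [ppIter]; rw [PP_len cs j h]; exact ih _ le_rfl

lemma ebeEnd_stop (cs : List Char) (d : Nat) (j : Nat) (h : cs.length ≤ j) :
    ebeEnd cs d j = cs.length := by
  unfold ebeEnd
  rw [eb_stop cs j _ _ _ h]

lemma main_bridge (cs : List Char) : ∀ j d, ebeEnd cs d j = ppIter cs d j := by
  have H : ∀ n j, cs.length - j ≤ n → ∀ d, ebeEnd cs d j = ppIter cs d j := by
    intro n
    induction n with
    | zero =>
      intro j hj d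
      rw [ebeEnd_stop cs d j (by omega), ppIter_len cs d j (by omega)]
    | succ n ih =>
      intro j hj d
      by_cases h : j < cs.length
      · by_cases h1 : cs[j] = '"'
        · -- a string at the top of the group: both scan past it
          have hA : ebeEnd cs d j = ebeEnd cs d (SS cs (j + 1)) := by
            unfold ebeEnd
            rw [EB_unfold cs j _ _ _ h]
            simp only [Bool.false_eq_true, if_false, if_pos h1]
            rw [str_bridge]
          have hs : SS cs (j + 1) ≤ cs.length := SS_le cs _
          have hs2 : cs.length ≤ SS cs (j + 1) ∨ j + 1 < SS cs (j + 1) := by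
            by_cases h5 : j + 1 < cs.length
            · exact Or.inr (SS_gt cs _ h5)
            · exact Or.inl (by rw [SS_len cs _ (by omega)])
          rw [hA, ih _ (by omega) d]
          exact (ppIter_congr cs d _ _ (PP_quote cs j h h1)).symm
        · by_cases h2 : cs[j] = '('
          · -- child group: A deepens, B recurses
            have hA : ebeEnd cs d j = ebeEnd cs (d + 1) (j + 1) := by
              unfold ebeEnd
              rw [EB_unfold cs j _ _ _ h]
              simp only [Bool.false_eq_true, if_false, if_neg h1, if_pos h2]
              norm_cast
            rw [hA, ih (j + 1) (by omega) (d + 1)]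
            have h3 : ppIter cs (d + 1) (j + 1) = ppIter cs d (PP cs (j + 1)) := by
              simp [ppIter]
            rw [h3]
            exact (ppIter_congr cs d j (PP cs (j + 1)) (PP_open cs j h h2)).symm
          · by_cases h3 : cs[j] = ')'
            · cases d with
              | zero =>
                have hA : ebeEnd cs 0 j = j + 1 := by
                  unfold ebeEnd
                  rw [EB_unfold cs j _ _ _ h]
                  simp only [Bool.false_eq_true, if_false, if_neg h1, if_neg h2, if_pos h3]
                  norm_num
                rw [hA]
                simp [ppIter, PP_close cs j h h3]
              | succ e =>
                have hA : ebeEnd cs (e + 1) j = ebeEnd cs e (j + 1) := by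
                  unfold ebeEnd
                  rw [EB_unfold cs j _ _ _ h]
                  simp only [Bool.false_eq_true, if_false, if_neg h1, if_neg h2, if_pos h3]
                  rw [if_neg (by push_cast; omega)]
                  have hd : ((e : Int) + 1 + 1) - 1 = (e : Int) + 1 := by ring
                  push_cast
                  rw [hd]
                rw [hA, ih (j + 1) (by omega) e]
                have h4 : ppIter cs (e + 1) j = ppIter cs e (PP cs j) := by simp [ppIter]
                rw [h4, PP_close cs j h h3]
            · -- ordinary char
              have hA : ebeEnd cs d j = ebeEnd cs d (j + 1) := by
                unfold ebeEnd
                rw [EB_unfold cs j _ _ _ h]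
                simp only [Bool.false_eq_true, if_false, if_neg h1, if_neg h2, if_neg h3]
              rw [hA, ih (j + 1) (by omega) d]
              exact (ppIter_congr cs d _ _ (PP_other cs j h h1 h2 h3)).symm
      · rw [ebeEnd_stop cs d j (by omega), ppIter_len cs d j (by omega)]
  intro j d
  exact H (cs.length - j) j le_rfl d

-- ----- extract_balanced_expr = slice up to the recursive-descent end -----

lemma ebe_spec (cs : List Char) (s : Nat) (hs : s < cs.length) (hc : cs[s] = '(') :
    pvEbe cs s = (cs.drop s).take (pvParseParen cs s - s) := by
  have hw : pvSkipWS (cs.length + 1) cs s = s := sw_stop' cs _ s hs (by rw [hc]; decide)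
  have hstep : EB cs s 0 false false = EB cs (s + 1) 1 false false := by
    rw [EB_unfold cs s _ _ _ hs]
    simp only [Bool.false_eq_true, if_false, if_neg (by rw [hc]; decide : ¬ cs[s] = '"'),
      if_pos hc]
    norm_num
  have hmain : ebeEnd cs 0 (s + 1) = PP cs (s + 1) := main_bridge cs (s + 1) 0
  have hPP : pvParseParen cs s = PP cs (s + 1) := rfl
  unfold ebeEnd at hmain
  rw [show ((0 : Nat) : Int) + 1 = 1 by norm_num] at hmain
  simp only [pvEbe]
  rw [hw, dif_pos hs, if_pos hc]
  have hEB : pvEbeLoop (cs.length + 1) cs s 0 false false = EB cs (s + 1) 1 false false := hstep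
  rw [hEB, hPP]
  cases hE : EB cs (s + 1) 1 false false with
  | some k =>
    rw [hE] at hmain
    simp only at hmain
    rw [← hmain]
  | none =>
    rw [hE] at hmain
    simp only at hmain
    rw [← hmain, List.take_of_length_le (by simp)]

lemma parseParen_gt (cs : List Char) (i : Nat) (h : i < cs.length) :
    i < pvParseParen cs i ∧ pvParseParen cs i ≤ cs.length := by
  unfold pvParseParen
  refine ⟨?_, pp_le cs _ _⟩
  by_cases h5 : i + 1 < cs.length
  · have := pp_gt cs (cs.length + 1) (i + 1) h5 (by omega); omega
  · rw [pp_len cs _ _ (by omega)]; omega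

-- ----- the two top-level loops agree -----

lemma top_eqv (cs : List Char) : ∀ fB fA idx acc, cs.length - idx < fA → cs.length - idx < fB →
    pvTopA fA cs idx acc = pvTopB fB cs idx acc := by
  intro fB
  induction fB with
  | zero => intro fA idx acc hA hB; omega
  | succ fB ih =>
    intro fA idx acc hA hB
    by_cases h : idx < cs.length
    · by_cases hws : PySem.Chars.isspace cs[idx] = true
      · -- whitespace: A consumes it inside pvSkipWS, B in its own iteration
        cases fA with
        | zero => omega
        | succ fA =>
          have hAstep : pvTopA (fA + 1) cs idx acc = pvTopA (fA + 1) cs (idx + 1) acc := by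
            simp only [pvTopA]
            rw [swF_step cs idx h hws]
          have hBstep : pvTopB (fB + 1) cs idx acc = pvTopB fB cs (idx + 1) acc := by
            simp only [pvTopB]
            rw [dif_pos h, if_pos hws]
          rw [hAstep, hBstep]
          exact ih (fA + 1) (idx + 1) acc (by omega) (by omega)
      · have hskip : pvSkipWS (cs.length + 1) cs idx = idx :=
          sw_stop' cs _ idx h (by simpa using hws)
        cases fA with
        | zero => omega
        | succ fA =>
          simp only [pvTopA, pvTopB]
          rw [hskip, dif_pos h, dif_pos h, if_neg hws]
          by_cases hsemi : cs[idx] = ';'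
          · rw [if_pos hsemi, if_pos hsemi]
            have hgt : idx < (match pvFindNL (cs.length + 1) cs idx with | none => cs.length | some nl => nl + 1) ∧
                (match pvFindNL (cs.length + 1) cs idx with | none => cs.length | some nl => nl + 1) ≤ cs.length := by
              cases hf : pvFindNL (cs.length + 1) cs idx with
              | none => simp; omega
              | some nl => have := findNL_ge cs _ idx nl hf; simp; omega
            exact ih fA _ acc (by omega) (by omega)
          · rw [if_neg hsemi, if_neg hsemi]
            by_cases hpar : cs[idx] = '('
            · rw [if_neg (by simp [hpar]), if_pos hpar]
              have hspec := ebe_spec cs idx h hpar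
              have hegt := parseParen_gt cs idx h
              have hcmdlen : (pvEbe cs idx).length = pvParseParen cs idx - idx := by
                rw [hspec]; simp; omega
              have hne : ¬ (pvEbe cs idx = []) := by
                intro hnil; rw [hnil] at hcmdlen; simp at hcmdlen; omega
              have hlen2 : (List.take (pvParseParen cs idx - idx) (List.drop idx cs)).length =
                  pvParseParen cs idx - idx := by simp; omega
              rw [if_neg hne, hspec, hlen2,
                show idx + (pvParseParen cs idx - idx) = pvParseParen cs idx from by omega]
              exact ih fA _ _ (by omega) (by omega)
            · rw [if_pos hpar, if_neg hpar]
              exact ih fA (idx + 1) acc (by omega) (by omega)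
    · cases fA with
      | zero => omega
      | succ fA =>
        simp only [pvTopA, pvTopB]
        rw [sw_stop cs _ idx (by omega), dif_neg (by omega), dif_neg (by omega)]

-- ===== VERDICT (by name: the statement is the Claim_ definition above) =====
theorem extract_all_commands_spec : Claim_equal_extract_all_commands := by
  intro s _
  unfold Spec_extract_all_commands extract_all_commands extract_all_commands_alt
  exact top_eqv _ _ _ 0 [] (by omega) (by omega)
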